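-- pv_equiv track=rewrite | github.com/shuwenw/NLP-QD-QA | ask.py | fullWhoClause
-- ===== SOURCE A (Python) =====
-- def fullWhoClause(doc_parse, i = -1):
--     cap = False
--     if(i == -1):
--         cap = True
--         i = doc_parse.index("who")
--     if(doc_parse[i + 1] == "," or doc_parse[i + 1] == "."):
--         return(doc_parse[i] + "?")
--     else:
--         if("'" in doc_parse[i+1]):
--             q = doc_parse[i] + fullWhoClause(doc_parse, i+1)
--         else:
--             q = doc_parse[i] + " " + fullWhoClause(doc_parse, i+1)
--         if(cap):
--             return(q.capitalize())
--         else: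
--             return(q)
-- ===== SOURCE B (Python) =====
-- def fullWhoClause(doc_parse, i=-1):
--     cap = i == -1
--     if cap:
--         i = doc_parse.index("who")
--     parts = []
--     j = i
--     while True:
--         nxt = doc_parse[j + 1]
--         if nxt == "," or nxt == ".":
--             parts.append(doc_parse[j] + "?")
--             break
--         parts.append(doc_parse[j])
--         parts.append("" if "'" in nxt else " ")
--         j += 1
--     q = "".join(parts)
--     return q.capitalize() if cap else q
-- ===== Notes on version B (the rewrite author's own statement) =====
-- stated objective: alternative
-- what changed: Replaces A's recursion (which rebuilds the tail by repeated string concatenation at every level and capitalizes at the top recursive level) with a single forward loop that appends the pieces to a list, joins them once, and capitalizes the joined string at the end.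
-- intended difference: When i = -1 and the token right after the first 'who' is ',' or '.', A returns 'who?' uncapitalized because its single-word early return skips the capitalize; B returns 'Who?', which is the evident intent of the default path. — e.g. on fullWhoClause(["who", ","], -1): A returns "who?", B returns "Who?"
-- outside the precondition, e.g. on fullWhoClause(['who', '.', 'x'], -2): A returns '. who?', B returns '. x who?'
import Mathlib
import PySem

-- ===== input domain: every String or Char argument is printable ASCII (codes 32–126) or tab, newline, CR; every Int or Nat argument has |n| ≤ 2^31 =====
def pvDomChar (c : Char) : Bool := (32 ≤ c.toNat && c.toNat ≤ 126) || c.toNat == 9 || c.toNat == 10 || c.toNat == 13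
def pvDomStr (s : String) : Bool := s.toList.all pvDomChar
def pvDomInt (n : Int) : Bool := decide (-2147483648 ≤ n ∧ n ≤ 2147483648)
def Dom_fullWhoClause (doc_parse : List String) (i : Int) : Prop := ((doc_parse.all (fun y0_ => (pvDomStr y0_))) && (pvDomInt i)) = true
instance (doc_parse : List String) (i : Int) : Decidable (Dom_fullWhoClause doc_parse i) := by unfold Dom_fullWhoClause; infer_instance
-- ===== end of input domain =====

-- B rewrites A's recursion as a forward loop that appends the pieces to a list and joins
-- them once, capitalizing the joined string at the end when the default i = -1 was used.

-- Python str.capitalize(): first char uppercased, rest lowercased (exact on the ASCII domain Dom_).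
def pyCapitalize (s : String) : String :=
  match s.toList with
  | [] => ""
  | c :: cs => String.ofList (PySem.Chars.upperChar c :: PySem.Chars.lower cs)

-- ===== PORT A =====
def fullWhoClause (doc_parse : List String) (i : Int) : String :=
  let cap : Bool := i == -1
  let i' : Int := if i == -1 then (((PySem.List.index? doc_parse "who").getD 0 : Nat) : Int) else i
  -- doc_parse.index("who"): ValueError when "who" ∉ doc_parse (excluded by Pre_; getD default unreachable there)
  match h : PySem.List.pyGet? doc_parse (i' + 1) with
  | none => ""  -- IndexError (excluded by Pre_)
  | some nxt =>
    if nxt == "," || nxt == "." then PySem.List.pyGetD doc_parse i' "" ++ "?"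
    else
      let q := if PySem.Str.isIn "'" nxt
               then PySem.List.pyGetD doc_parse i' "" ++ fullWhoClause doc_parse (i' + 1)
               else PySem.List.pyGetD doc_parse i' "" ++ " " ++ fullWhoClause doc_parse (i' + 1)
      if cap then pyCapitalize q else q
termination_by (((doc_parse.length : Int) + 3) - i).toNat
decreasing_by
  all_goals
    have hin : PySem.Raise.InRange doc_parse.length (i' + 1) := by
      by_contra hc
      rw [← PySem.List.pyGet?_eq_none_iff (xs := doc_parse)] at hc
      simp [hc] at h
    simp only [PySem.Raise.InRange, i'] at hin
    by_cases hi : i = -1 <;> simp [hi] at hin ⊢ <;> omega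

-- ===== PORT B =====
-- the while-True loop of Source B: j walks forward, pieces are appended to acc, the loop
-- breaks after appending doc_parse[j] + "?" when the next token is "," or "."
def altGo (doc_parse : List String) (j : Int) (acc : List String) : List String :=
  match h : PySem.List.pyGet? doc_parse (j + 1) with
  | none => acc  -- IndexError (excluded by Pre_)
  | some nxt =>
    if nxt == "," || nxt == "." then acc ++ [PySem.List.pyGetD doc_parse j "" ++ "?"]
    else altGo doc_parse (j + 1)
           (acc ++ [PySem.List.pyGetD doc_parse j "", if PySem.Str.isIn "'" nxt then "" else " "])
termination_by (((doc_parse.length : Int) + 2) - j).toNat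
decreasing_by
  have hin : PySem.Raise.InRange doc_parse.length (j + 1) := by
    by_contra hc
    rw [← PySem.List.pyGet?_eq_none_iff (xs := doc_parse)] at hc
    simp [hc] at h
  simp only [PySem.Raise.InRange] at hin
  omega

def fullWhoClause_alt (doc_parse : List String) (i : Int) : String :=
  let cap : Bool := i == -1
  let j : Int := if i == -1 then (((PySem.List.index? doc_parse "who").getD 0 : Nat) : Int) else i
  let q := PySem.Str.join "" (altGo doc_parse j [])
  if cap then pyCapitalize q else q

-- ===== PRECONDITION & SPEC =====
-- Pre_ excludes (a) inputs where A raises — i = -1 with "who" absent (ValueError), and walks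
-- that run off the list because no "," or "." token follows the start position (IndexError);
-- (b) i < -1 with no "," or "." among the wrapped trailing positions, where A's walk reaches
-- index -1 and accidentally re-enters its sentinel branch, restarting from the first "who" —
-- an artefact of overloading -1 as a default marker.
def Pre_fullWhoClause (doc_parse : List String) (i : Int) : Prop :=
  if i = -1 then
    "who" ∈ doc_parse ∧
      ((doc_parse.drop ((PySem.List.index? doc_parse "who").getD 0 + 1)).any
        (fun t => t == "," || t == ".")) = true
  else if 0 ≤ i then
    ((doc_parse.drop (i.toNat + 1)).any (fun t => t == "," || t == ".")) = true
  else
    -(doc_parse.length : Int) ≤ i ∧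
      ((doc_parse.drop (((doc_parse.length : Int) + i + 1).toNat)).any
        (fun t => t == "," || t == ".")) = true

instance (doc_parse : List String) (i : Int) : Decidable (Pre_fullWhoClause doc_parse i) := by
  unfold Pre_fullWhoClause; infer_instance

def pvWitness_fullWhoClause : List String × Int := (["who", "is", "he", "."], -1)

-- When i = -1 and the token right after the first "who" is "," or ".", A returns "who?"
-- uncapitalized (its early return skips the capitalize), while B returns "Who?"; capitalizing
-- the produced question is evidently the intent of the default path.
def D_fullWhoClause (doc_parse : List String) (i : Int) : Prop :=
  i = -1 ∧ "who" ∈ doc_parse ∧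
    (doc_parse[(PySem.List.index? doc_parse "who").getD 0 + 1]? = some "," ∨
     doc_parse[(PySem.List.index? doc_parse "who").getD 0 + 1]? = some ".")

instance (doc_parse : List String) (i : Int) : Decidable (D_fullWhoClause doc_parse i) := by
  unfold D_fullWhoClause; infer_instance

def Spec_fullWhoClause (doc_parse : List String) (i : Int) (out : String) : Prop :=
  ¬ D_fullWhoClause doc_parse i → out = fullWhoClause_alt doc_parse i
instance (doc_parse : List String) (i : Int) (out : String) : Decidable (Spec_fullWhoClause doc_parse i out) := by unfold Spec_fullWhoClause; infer_instance

def pvDiffWitness_fullWhoClause : List String × Int := (["who", ","], -1)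
def pvDiffWitnessOut_fullWhoClause : String × String := ("who?", "Who?")

-- ===== CLAIM (what is proved, stated in full; the proofs are below) =====
def Claim_unchanged_fullWhoClause : Prop := ∀ (doc_parse : List String) (i : Int), Dom_fullWhoClause doc_parse i → Pre_fullWhoClause doc_parse i → Spec_fullWhoClause doc_parse i (fullWhoClause doc_parse i)
def Claim_changed_fullWhoClause : Prop := Dom_fullWhoClause (pvDiffWitness_fullWhoClause.1) (pvDiffWitness_fullWhoClause.2) ∧ Pre_fullWhoClause (pvDiffWitness_fullWhoClause.1) (pvDiffWitness_fullWhoClause.2) ∧ D_fullWhoClause (pvDiffWitness_fullWhoClause.1) (pvDiffWitness_fullWhoClause.2) ∧ fullWhoClause (pvDiffWitness_fullWhoClause.1) (pvDiffWitness_fullWhoClause.2) = pvDiffWitnessOut_fullWhoClause.1 ∧ fullWhoClause_alt (pvDiffWitness_fullWhoClause.1) (pvDiffWitness_fullWhoClause.2) = pvDiffWitnessOut_fullWhoClause.2 ∧ pvDiffWitnessOut_fullWhoClause.1 ≠ pvDiffWitnessOut_fullWhoClause.2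
def Claim_exact_fullWhoClause : Prop := ∀ (doc_parse : List String) (i : Int), Dom_fullWhoClause doc_parse i → Pre_fullWhoClause doc_parse i → D_fullWhoClause doc_parse i → fullWhoClause doc_parse i ≠ fullWhoClause_alt doc_parse i

-- ===== LEMMAS AND PROOFS =====

theorem intercalate_nil {α : Type} (l : List (List α)) : [].intercalate l = l.flatten := by
  simp only [List.intercalate]
  induction l with
  | nil => simp
  | cons a t ih => cases t <;> simp_all [List.intersperse]

theorem join_empty_cons (x : String) (parts : List String) :
    PySem.Str.join "" (x :: parts) = x ++ PySem.Str.join "" parts := by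
  apply String.toList_inj.mp
  simp [PySem.Str.join, PySem.Chars.join, intercalate_nil]

theorem join_empty_nil : PySem.Str.join "" ([] : List String) = "" := by decide

theorem cast_succ (j : Nat) : ((j : Int) + 1) = ((j + 1 : Nat) : Int) := by push_cast; ring

theorem altGo_none (dp : List String) (j : Int) (acc : List String)
    (h : PySem.List.pyGet? dp (j + 1) = none) : altGo dp j acc = acc := by
  rw [altGo.eq_def]; split <;> simp_all

theorem altGo_punct (dp : List String) (j : Int) (acc : List String) (nxt : String)
    (h : PySem.List.pyGet? dp (j + 1) = some nxt) (hp : (nxt == "," || nxt == ".") = true) :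
    altGo dp j acc = acc ++ [PySem.List.pyGetD dp j "" ++ "?"] := by
  rw [altGo.eq_def]; split <;> simp_all

theorem altGo_step (dp : List String) (j : Int) (acc : List String) (nxt : String)
    (h : PySem.List.pyGet? dp (j + 1) = some nxt) (hp : (nxt == "," || nxt == ".") = false) :
    altGo dp j acc =
      altGo dp (j + 1) (acc ++ [PySem.List.pyGetD dp j "", if PySem.Str.isIn "'" nxt then "" else " "]) := by
  rw [altGo.eq_def]; split <;> simp_all <;> try rfl

theorem fwc_nat (dp : List String) (j : Nat) (nxt : String)
    (h : PySem.List.pyGet? dp ((j : Int) + 1) = some nxt) :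
    fullWhoClause dp (j : Int) =
      if (nxt == "," || nxt == ".") = true then PySem.List.pyGetD dp (j : Int) "" ++ "?"
      else if PySem.Str.isIn "'" nxt
           then PySem.List.pyGetD dp (j : Int) "" ++ fullWhoClause dp ((j : Int) + 1)
           else PySem.List.pyGetD dp (j : Int) "" ++ " " ++ fullWhoClause dp ((j : Int) + 1) := by
  rw [fullWhoClause.eq_def]
  have hcap : ((j : Int) == -1) = false := by simp
  simp only [hcap, Bool.false_eq_true, if_neg, not_false_eq_true]
  split <;> simp_all

theorem alt_nat (dp : List String) (j : Nat) :
    fullWhoClause_alt dp (j : Int) = PySem.Str.join "" (altGo dp (j : Int) []) := by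
  rw [fullWhoClause_alt]
  have hcap : ((j : Int) == -1) = false := by simp
  simp [hcap]

theorem altGo_acc (dp : List String) :
    ∀ (n : Nat) (j : Int) (acc : List String), (((dp.length : Int) + 2) - j).toNat ≤ n →
      altGo dp j acc = acc ++ altGo dp j [] := by
  intro n
  induction n with
  | zero =>
    intro j acc hle
    have hnone : PySem.List.pyGet? dp (j + 1) = none := by
      rw [PySem.List.pyGet?_eq_none_iff]
      simp [PySem.Raise.InRange]
      omega
    rw [altGo_none dp j acc hnone, altGo_none dp j [] hnone]
    simp
  | succ n ih =>
    intro j acc hle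
    cases hg : PySem.List.pyGet? dp (j + 1) with
    | none => rw [altGo_none dp j acc hg, altGo_none dp j [] hg]; simp
    | some nxt =>
      by_cases hp : (nxt == "," || nxt == ".") = true
      · rw [altGo_punct dp j acc nxt hg hp, altGo_punct dp j [] nxt hg hp]; simp
      · have hp' : (nxt == "," || nxt == ".") = false := by simpa using hp
        have hin : PySem.Raise.InRange dp.length (j + 1) := by
          by_contra hc
          rw [← PySem.List.pyGet?_eq_none_iff (xs := dp)] at hc
          simp [hc] at hg
        simp only [PySem.Raise.InRange] at hin
        rw [altGo_step dp j acc nxt hg hp', altGo_step dp j [] nxt hg hp']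
        have ih' := fun acc => ih (j + 1) acc (by omega)
        rw [ih' (acc ++ [PySem.List.pyGetD dp j "", if PySem.Str.isIn "'" nxt then "" else " "]),
          ih' ([] ++ [PySem.List.pyGetD dp j "", if PySem.Str.isIn "'" nxt then "" else " "])]
        simp

theorem main_eq (dp : List String) :
    ∀ (n j : Nat), dp.length - j ≤ n →
      ((dp.drop (j + 1)).any (fun t => t == "," || t == ".")) = true →
      fullWhoClause dp (j : Int) = PySem.Str.join "" (altGo dp (j : Int) []) := by
  intro n
  induction n with
  | zero =>
    intro j hle hany
    exfalso
    have hlt : j + 1 ≤ dp.length := by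
      by_contra hc
      rw [List.drop_eq_nil_of_le (by omega)] at hany
      simp at hany
    omega
  | succ n ih =>
    intro j hle hany
    have hlt : j + 1 < dp.length := by
      by_contra hc
      rw [List.drop_eq_nil_of_le (by omega)] at hany
      simp at hany
    have hsome : PySem.List.pyGet? dp ((j : Int) + 1) = some dp[j + 1] := by
      rw [cast_succ, PySem.List.pyGet?_natCast]
      simp [hlt]
    rw [fwc_nat dp j dp[j + 1] hsome]
    by_cases hp : (dp[j + 1] == "," || dp[j + 1] == ".") = true
    · rw [altGo_punct dp j [] dp[j + 1] hsome hp]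
      simp [hp, join_empty_cons, join_empty_nil, String.append_empty]
    · have hp' : (dp[j + 1] == "," || dp[j + 1] == ".") = false := by simpa using hp
      have hdrop : dp.drop (j + 1) = dp[j + 1] :: dp.drop (j + 2) :=
        List.drop_eq_getElem_cons hlt
      have hany' : ((dp.drop (j + 1 + 1)).any (fun t => t == "," || t == ".")) = true := by
        rw [hdrop, List.any_cons] at hany
        simpa [hp] using hany
      have hrec := ih (j + 1) (by omega) hany'
      rw [altGo_step dp j [] dp[j + 1] hsome hp']
      rw [cast_succ, altGo_acc dp (dp.length + 2) ((j + 1 : Nat) : Int) _ (by omega)]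
      simp only [List.nil_append, List.cons_append]
      rw [join_empty_cons, join_empty_cons]
      rw [← hrec]
      simp only [hp', Bool.false_eq_true, if_neg, not_false_eq_true]
      by_cases hq : PySem.Chars.isIn ['\''] dp[j + 1].toList = true
      · simp [hq, String.empty_append]
      · simp [hq, String.append_assoc]

theorem main_eq_neg (dp : List String) :
    ∀ (n m : Nat), dp.length - m ≤ n →
      ((dp.drop (m + 1)).any (fun t => t == "," || t == ".")) = true →
      fullWhoClause dp ((m : Int) - dp.length) =
        PySem.Str.join "" (altGo dp ((m : Int) - dp.length) []) := by
  intro n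
  induction n with
  | zero =>
    intro m hle hany
    exfalso
    have hlt : m + 1 ≤ dp.length := by
      by_contra hc
      rw [List.drop_eq_nil_of_le (by omega)] at hany
      simp at hany
    omega
  | succ n ih =>
    intro m hle hany
    have hlt : m + 1 < dp.length := by
      by_contra hc
      rw [List.drop_eq_nil_of_le (by omega)] at hany
      simp at hany
    have hcast : (m : Int) - dp.length + 1 = -(((dp.length - (m + 1) : Nat) : Int)) := by
      push_cast [Nat.cast_sub (by omega : m + 1 ≤ dp.length)]
      ring
    have hsome : PySem.List.pyGet? dp ((m : Int) - dp.length + 1) = some dp[m + 1] := by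
      rw [hcast, PySem.List.pyGet?_neg_natCast dp (dp.length - (m + 1)) (by omega) (by omega)]
      rw [show dp.length - (dp.length - (m + 1)) = m + 1 from by omega]
      simp [hlt]
    have hcap : (((m : Int) - dp.length) == -1) = false := by
      simp only [beq_eq_false_iff_ne, ne_eq]
      omega
    rw [fullWhoClause.eq_def]
    simp only [hcap, Bool.false_eq_true, if_neg, not_false_eq_true]
    split
    · next heq =>
      simp only [hcap, Bool.false_eq_true, if_false] at heq
      rw [hsome] at heq
      exact absurd heq (by simp)
    · next nxt heq =>
      simp only [hcap, Bool.false_eq_true, if_false] at heq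
      rw [hsome] at heq
      injection heq with heq
      subst heq
      by_cases hp : (dp[m + 1] == "," || dp[m + 1] == ".") = true
      · rw [altGo_punct dp ((m : Int) - dp.length) [] dp[m + 1] hsome hp]
        simp [hp, join_empty_cons, join_empty_nil, String.append_empty]
      · have hp' : (dp[m + 1] == "," || dp[m + 1] == ".") = false := by simpa using hp
        have hdrop : dp.drop (m + 1) = dp[m + 1] :: dp.drop (m + 2) :=
          List.drop_eq_getElem_cons hlt
        have hany' : ((dp.drop (m + 1 + 1)).any (fun t => t == "," || t == ".")) = true := by
          rw [hdrop, List.any_cons] at hany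
          simpa [hp] using hany
        have hrec := ih (m + 1) (by omega) hany'
        have hcast2 : (m : Int) - dp.length + 1 = ((m + 1 : Nat) : Int) - dp.length := by
          push_cast
          ring
        rw [altGo_step dp ((m : Int) - dp.length) [] dp[m + 1] hsome hp']
        rw [hcast2, altGo_acc dp (2 * dp.length + 2) (((m + 1 : Nat) : Int) - dp.length) _ (by omega)]
        simp only [List.nil_append, List.cons_append]
        rw [join_empty_cons, join_empty_cons]
        rw [← hrec]
        simp only [hp', Bool.false_eq_true, if_neg, not_false_eq_true]
        by_cases hq : PySem.Chars.isIn ['\''] dp[m + 1].toList = true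
        · simp [hq, String.empty_append]
        · simp [hq, String.append_assoc]

theorem alt_ne1 (dp : List String) (j : Int) (hj : (j == -1) = false) :
    fullWhoClause_alt dp j = PySem.Str.join "" (altGo dp j []) := by
  rw [fullWhoClause_alt]
  simp [hj]

theorem fwc_neg1_punct (dp : List String) (k : Nat) (nxt : String)
    (hk : PySem.List.index? dp "who" = some k)
    (h : PySem.List.pyGet? dp ((k : Int) + 1) = some nxt)
    (hp : (nxt == "," || nxt == ".") = true) :
    fullWhoClause dp (-1) = PySem.List.pyGetD dp (k : Int) "" ++ "?" := by
  rw [fullWhoClause.eq_def]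
  simp only [hk, Option.getD_some, show (((-1 : Int) == -1) = true) from rfl]
  split <;> simp_all <;> tauto

theorem fwc_neg1_step (dp : List String) (k : Nat) (nxt : String)
    (hk : PySem.List.index? dp "who" = some k)
    (h : PySem.List.pyGet? dp ((k : Int) + 1) = some nxt)
    (hp : (nxt == "," || nxt == ".") = false) :
    fullWhoClause dp (-1) = pyCapitalize (fullWhoClause dp (k : Int)) := by
  rw [fullWhoClause.eq_def]
  simp only [hk, Option.getD_some, show (((-1 : Int) == -1) = true) from rfl]
  rw [fwc_nat dp k nxt h]
  split <;> simp_all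

theorem alt_neg1 (dp : List String) (k : Nat) (hk : PySem.List.index? dp "who" = some k) :
    fullWhoClause_alt dp (-1) = pyCapitalize (PySem.Str.join "" (altGo dp (k : Int) [])) := by
  rw [fullWhoClause_alt]
  have hk' : List.idxOf? "who" dp = some k := by rw [← PySem.List.index?_eq_idxOf?]; exact hk
  simp [hk']

theorem fullWhoClause_spec : Claim_unchanged_fullWhoClause := by
  intro dp i hDom hPre hnD
  by_cases hi : i = -1
  · subst hi
    rw [Pre_fullWhoClause, if_pos rfl] at hPre
    obtain ⟨hmem, hany⟩ := hPre
    obtain ⟨k, hk⟩ : ∃ k, PySem.List.index? dp "who" = some k := by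
      cases hidx : PySem.List.index? dp "who" with
      | none => rw [PySem.List.index?_eq_none_iff] at hidx; exact absurd hmem hidx
      | some k => exact ⟨k, rfl⟩
    rw [hk, Option.getD_some] at hany
    have hlt : k + 1 < dp.length := by
      by_contra hc
      rw [List.drop_eq_nil_of_le (by omega)] at hany
      simp at hany
    have hsome : PySem.List.pyGet? dp ((k : Int) + 1) = some dp[k + 1] := by
      rw [cast_succ, PySem.List.pyGet?_natCast]
      simp [hlt]
    have hne : ¬(dp[k + 1]? = some "," ∨ dp[k + 1]? = some ".") := by
      intro hor
      exact hnD ⟨rfl, hmem, by rw [hk, Option.getD_some]; exact hor⟩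
    rw [List.getElem?_eq_getElem hlt] at hne
    push Not at hne
    have hp : (dp[k + 1] == "," || dp[k + 1] == ".") = false := by
      have h1 : dp[k + 1] ≠ "," := fun hc => hne.1 (by rw [hc])
      have h2 : dp[k + 1] ≠ "." := fun hc => hne.2 (by rw [hc])
      simp [h1, h2]
    rw [fwc_neg1_step dp k dp[k + 1] hk hsome hp, alt_neg1 dp k hk,
      main_eq dp dp.length k (by omega) hany]
  · rw [Pre_fullWhoClause, if_neg hi] at hPre
    by_cases hnn : 0 ≤ i
    · rw [if_pos hnn] at hPre
      have hin : i = ((i.toNat : Nat) : Int) := (Int.toNat_of_nonneg hnn).symm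
      rw [hin, alt_nat dp i.toNat]
      exact main_eq dp dp.length i.toNat (by omega) hPre
    · rw [if_neg hnn] at hPre
      obtain ⟨hge, hany⟩ := hPre
      have hm : i = (((dp.length : Int) + i).toNat : Int) - dp.length := by omega
      have hidx : ((dp.length : Int) + i + 1).toNat = ((dp.length : Int) + i).toNat + 1 := by omega
      rw [hidx] at hany
      rw [hm, alt_ne1 dp ((((dp.length : Int) + i).toNat : Int) - dp.length)
        (by simp only [beq_eq_false_iff_ne, ne_eq]; omega)]
      exact main_eq_neg dp dp.length ((dp.length : Int) + i).toNat (by omega) hany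

theorem fullWhoClause_changed : Claim_changed_fullWhoClause := by
  unfold Claim_changed_fullWhoClause
  have hk : PySem.List.index? ["who", ","] "who" = some 0 := by decide
  have hsome : PySem.List.pyGet? ["who", ","] (((0 : Nat) : Int) + 1) = some "," := by decide
  have hp : (("," : String) == "," || ("," : String) == ".") = true := by decide
  refine ⟨by decide, by decide, by decide, ?_, ?_, by decide⟩
  · rw [show pvDiffWitness_fullWhoClause = (["who", ","], -1) from rfl]
    rw [show pvDiffWitnessOut_fullWhoClause.1 = "who?" from rfl]
    rw [fwc_neg1_punct ["who", ","] 0 "," hk hsome hp]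
    decide
  · rw [show pvDiffWitness_fullWhoClause = (["who", ","], -1) from rfl]
    rw [show pvDiffWitnessOut_fullWhoClause.2 = "Who?" from rfl]
    rw [alt_neg1 ["who", ","] 0 hk, altGo_punct ["who", ","] ((0 : Nat) : Int) [] "," hsome hp]
    decide

theorem fullWhoClause_tight : Claim_exact_fullWhoClause := by
  intro dp i hDom hPre hD
  obtain ⟨hi, hmem, hor⟩ := hD
  subst hi
  obtain ⟨k, hk⟩ : ∃ k, PySem.List.index? dp "who" = some k := by
    cases hidx : PySem.List.index? dp "who" with
    | none => rw [PySem.List.index?_eq_none_iff] at hidx; exact absurd hmem hidx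
    | some k => exact ⟨k, rfl⟩
  rw [hk, Option.getD_some] at hor
  have hlt : k + 1 < dp.length := by
    rcases hor with h | h <;> exact (List.getElem?_eq_some_iff.mp h).1
  have hval : dp[k + 1] = "," ∨ dp[k + 1] = "." := by
    rcases hor with h | h
    · exact Or.inl (by rw [List.getElem?_eq_getElem hlt] at h; exact Option.some.inj h)
    · exact Or.inr (by rw [List.getElem?_eq_getElem hlt] at h; exact Option.some.inj h)
  have hsome : PySem.List.pyGet? dp ((k : Int) + 1) = some dp[k + 1] := by
    rw [cast_succ, PySem.List.pyGet?_natCast]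
    simp [hlt]
  have hp : (dp[k + 1] == "," || dp[k + 1] == ".") = true := by
    rcases hval with h | h <;> simp [h]
  obtain ⟨hklt, hwho, -⟩ := PySem.List.getElem_of_index?_eq_some hk
  have hgd : PySem.List.pyGetD dp (k : Int) "" = "who" := by
    rw [PySem.List.pyGetD_natCast]
    simp [List.getD, List.getElem?_eq_getElem hklt, hwho]
  rw [fwc_neg1_punct dp k dp[k + 1] hk hsome hp, alt_neg1 dp k hk,
    altGo_punct dp ((k : Nat) : Int) [] dp[k + 1] hsome hp, hgd]
  simp only [List.nil_append]
  rw [join_empty_cons, join_empty_nil, String.append_empty]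
  decide
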